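-- pv_equiv track=rewrite | github.com/nuclearfall/sitrepc2 | src/sitrepc2/gazetteer/osm_ingest.py | choose_canonical_name
-- ===== SOURCE A (Python) =====
-- from typing import Callable, Iterable, Optional, Sequence, Set
--
-- _CANONICAL_PREF_ORDER: Sequence[str] = (
--     "name",
--     "official_name",
--     "short_name",
--     "loc_name",
--     "name_alt",
--     "name_old",
-- )
--
-- def choose_canonical_name(lang_names):
--     if not lang_names:
--         return None
--     by_base = {}
--     for base, val in lang_names:
--         by_base.setdefault(base, []).append(val)
--     for base in _CANONICAL_PREF_ORDER:
--         if base in by_base: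
--             return by_base[base][0]
--     return lang_names[0][1]
-- ===== SOURCE B (Python) =====
-- _CANONICAL_PREF_ORDER = (
--     "name",
--     "official_name",
--     "short_name",
--     "loc_name",
--     "name_alt",
--     "name_old",
-- )
--
-- def choose_canonical_name(lang_names):
--     if not lang_names:
--         return None
--     for base in _CANONICAL_PREF_ORDER:
--         for b, val in lang_names:
--             if b == base:
--                 return val
--     return lang_names[0][1]
-- ===== Notes on version B (the rewrite author's own statement) =====
-- stated objective: simpler
-- what changed: Drops the by_base grouping dict entirely: instead of indexing all values by base and then probing the index, B scans lang_names directly for each preferred base in turn and returns the first match, falling back to lang_names[0][1].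
import Mathlib
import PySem

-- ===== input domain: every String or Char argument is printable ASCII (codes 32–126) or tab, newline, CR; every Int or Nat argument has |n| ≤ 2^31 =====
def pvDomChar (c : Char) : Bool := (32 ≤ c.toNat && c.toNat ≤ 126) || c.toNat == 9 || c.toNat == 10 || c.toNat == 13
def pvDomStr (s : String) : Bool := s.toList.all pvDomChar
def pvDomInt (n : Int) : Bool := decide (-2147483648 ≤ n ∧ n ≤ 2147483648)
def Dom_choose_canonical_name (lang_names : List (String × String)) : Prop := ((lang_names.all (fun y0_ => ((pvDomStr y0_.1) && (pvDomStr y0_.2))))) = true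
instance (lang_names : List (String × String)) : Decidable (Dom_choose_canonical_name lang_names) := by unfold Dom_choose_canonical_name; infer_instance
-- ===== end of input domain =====

-- B drops A's by_base grouping dict and instead scans lang_names once per preferred base; simpler, same results.

def pvPrefOrder : List String :=
  ["name", "official_name", "short_name", "loc_name", "name_alt", "name_old"]

-- ===== PORT A =====
-- build by_base: setdefault(base, []).append(val)  ==  modify base [] (· ++ [val])
def choose_canonical_name (lang_names : List (String × String)) : Option String :=
  if lang_names = [] then none
  else
    let by_base : PySem.Dict String (List String) :=
      lang_names.foldl (fun d p => d.modify p.1 [] (· ++ [p.2])) PySem.Dict.empty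
    match pvPrefOrder.find? (fun base => by_base.contains base) with
    | some base => PySem.List.pyGet? (by_base.getD base []) 0   -- by_base[base][0]
    | none => (PySem.List.pyGet? lang_names 0).map Prod.snd      -- lang_names[0][1]

-- ===== PORT B =====
def choose_canonical_name_alt (lang_names : List (String × String)) : Option String :=
  if lang_names = [] then none
  else
    match pvPrefOrder.findSome? (fun base => (lang_names.find? (fun p => p.1 == base)).map Prod.snd) with
    | some v => some v
    | none => (PySem.List.pyGet? lang_names 0).map Prod.snd

-- ===== PRECONDITION & SPEC =====
def Spec_choose_canonical_name (lang_names : List (String × String)) (out : Option String) : Prop := out = choose_canonical_name_alt lang_names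
instance (lang_names : List (String × String)) (out : Option String) : Decidable (Spec_choose_canonical_name lang_names out) := by unfold Spec_choose_canonical_name; infer_instance

-- ===== CLAIM (what is proved, stated in full; the proofs are below) =====
def Claim_equal_choose_canonical_name : Prop := ∀ (lang_names : List (String × String)), Dom_choose_canonical_name lang_names → Spec_choose_canonical_name lang_names (choose_canonical_name lang_names)

-- ===== LEMMAS AND PROOFS =====

theorem pv_head?_filter_map_snd (p : String) (l : List (String × String)) :
    ((l.filter (fun q => q.1 == p)).map Prod.snd).head? =
      (l.find? (fun q => q.1 == p)).map Prod.snd := by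
  induction l with
  | nil => rfl
  | cons x xs ih =>
    by_cases h : x.1 = p
    · simp [h]
    · simp [h, ih]

theorem pv_getD_build (ln : List (String × String)) (b : String) :
    ((ln.foldl (fun d p => d.modify p.1 [] (· ++ [p.2])) PySem.Dict.empty).getD b []) =
      (ln.filter (fun p => p.1 == b)).map Prod.snd := by
  simpa using PySem.Dict.getD_foldl_modify_append (l := ln)
    (d := (PySem.Dict.empty : PySem.Dict String (List String))) (c := b)

theorem pv_pyGet?_zero {α : Type} (l : List α) : PySem.List.pyGet? l 0 = l.head? := by
  cases l <;> simp [PySem.List.pyGet?, PySem.List.pyIdx?]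

theorem pv_contains_build (ln : List (String × String)) (b : String) :
    ((ln.foldl (fun d p => d.modify p.1 [] (· ++ [p.2])) PySem.Dict.empty).contains b) =
      (ln.find? (fun p => p.1 == b)).isSome := by
  rw [PySem.Dict.contains_eq_decide_mem_keys,
    PySem.Dict.keys_foldl_modify_key (key := Prod.fst)]
  cases hc : ln.find? (fun p => p.1 == b) with
  | none =>
    simp only [Option.isSome_none, decide_eq_false_iff_not, PySem.Set.mem_update,
      List.mem_map]
    rintro (h | ⟨x, hx, hxb⟩)
    · simp at h
    · exact (List.find?_eq_none.mp hc x hx) (by simpa using hxb)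
  | some q =>
    have hq : (q.1 == b) = true := List.find?_some (p := fun r : String × String => r.1 == b) hc
    have hmem := List.mem_of_find?_eq_some hc
    simp only [Option.isSome_some, decide_eq_true_eq, PySem.Set.mem_update, List.mem_map]
    exact Or.inr ⟨q, hmem, by simpa using hq⟩

theorem pv_search (ln : List (String × String)) (os : List String) (fb : Option String) :
    (match os.find? (fun b =>
        (ln.foldl (fun d p => d.modify p.1 [] (· ++ [p.2])) PySem.Dict.empty).contains b) with
      | some b => PySem.List.pyGet?
          ((ln.foldl (fun d p => d.modify p.1 [] (· ++ [p.2])) PySem.Dict.empty).getD b []) 0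
      | none => fb) =
    (match os.findSome? (fun b => (ln.find? (fun p => p.1 == b)).map Prod.snd) with
      | some v => some v
      | none => fb) := by
  induction os with
  | nil => rfl
  | cons b os ih =>
    by_cases h : ((ln.foldl (fun d p => d.modify p.1 [] (· ++ [p.2])) PySem.Dict.empty).contains b) = true
    · have hf := pv_contains_build ln b
      rw [h] at hf
      obtain ⟨q, hq⟩ := Option.isSome_iff_exists.mp hf.symm
      simp [h, hq, pv_getD_build, pv_pyGet?_zero, pv_head?_filter_map_snd]
    · have hf := pv_contains_build ln b
      rw [Bool.not_eq_true] at h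
      rw [h] at hf
      have hn : (ln.find? (fun p => p.1 == b)) = none := by
        cases hc : ln.find? (fun p => p.1 == b) <;> simp [hc] at hf ⊢
      simp [h, hn, ih]

-- ===== VERDICT (by name: the statement is the Claim_ definition above) =====
theorem choose_canonical_name_spec : Claim_equal_choose_canonical_name := by
  intro ln _
  unfold Spec_choose_canonical_name choose_canonical_name choose_canonical_name_alt
  by_cases h : ln = []
  · simp [h]
  · simp only [h, if_false]
    exact pv_search ln pvPrefOrder _
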